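-- pv_equiv track=rewrite | github.com/MaskedPaladin/CanvasTradingCharting | chart.py | getTilesByPoints
-- ===== SOURCE A (Python) =====
-- def getTilesByPoints(dataArray):
-- 	tiles = []
-- 	for i, entry in enumerate(dataArray):
-- 		for n in range(entry[3], entry[2]):
-- 			if entry[0] > entry[1]:
-- 				if n not in range(entry[1], entry[0]):
-- 					tiles.append((i, 0-n, "\033[0;0;0m|"))
-- 				else:
-- 					tiles.append((i, 0-n, "\033[0;0;41m "))
-- 			elif entry[0] < entry[1]:
-- 				if n not in range(entry[0], entry[1]):
-- 					tiles.append((i, 0-n, "\033[0;0;0m|"))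
-- 				else:
-- 					tiles.append((i, 0-n, "\033[0;0;42m "))
-- 			elif entry[0] == entry[1]:
-- 				tiles.append((i, 0-n, "\033[0;0;0m|"))
-- 	return tiles
-- ===== SOURCE B (Python) =====
-- def getTilesByPoints(dataArray):
-- 	tiles = []
-- 	for i, entry in enumerate(dataArray):
-- 		o, c, hi, lo = entry
-- 		bodyLow, bodyHigh = min(o, c), max(o, c)
-- 		body = "\033[0;0;41m " if o > c else ("\033[0;0;42m " if o < c else None)
-- 		for n in range(lo, min(hi, bodyLow)):
-- 			tiles.append((i, -n, "\033[0;0;0m|"))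
-- 		if body is not None:
-- 			for n in range(max(lo, bodyLow), min(hi, bodyHigh)):
-- 				tiles.append((i, -n, body))
-- 		for n in range(max(lo, bodyHigh), hi):
-- 			tiles.append((i, -n, "\033[0;0;0m|"))
-- 	return tiles
-- ===== Notes on version B (the rewrite author's own statement) =====
-- stated objective: alternative
-- what changed: Replaces A's single per-pixel loop with a membership branch by three contiguous clamped segment loops per candlestick (lower wick, colored body, upper wick), each emitting its tile kind unconditionally.
import Mathlib
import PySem

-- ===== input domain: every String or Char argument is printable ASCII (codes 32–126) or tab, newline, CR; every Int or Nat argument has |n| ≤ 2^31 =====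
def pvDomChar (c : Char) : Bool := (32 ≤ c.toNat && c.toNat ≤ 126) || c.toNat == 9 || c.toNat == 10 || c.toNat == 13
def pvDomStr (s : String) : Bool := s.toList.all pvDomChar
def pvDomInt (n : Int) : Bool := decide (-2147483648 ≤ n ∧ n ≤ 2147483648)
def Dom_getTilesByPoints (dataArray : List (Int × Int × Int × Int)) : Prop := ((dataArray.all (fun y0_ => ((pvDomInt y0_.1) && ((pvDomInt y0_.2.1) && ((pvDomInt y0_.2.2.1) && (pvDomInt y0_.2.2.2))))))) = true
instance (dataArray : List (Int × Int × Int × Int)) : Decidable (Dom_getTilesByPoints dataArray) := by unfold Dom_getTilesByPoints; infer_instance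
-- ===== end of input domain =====

-- B replaces A's single pixel loop with a membership branch by three contiguous
-- clamped segment loops (lower wick, body, upper wick); objective: simpler/alternative decomposition.

-- ===== PORT A =====
def getTilesByPoints (dataArray : List (Int × Int × Int × Int)) : List (Int × Int × String) :=
  (PySem.List.enumerate dataArray 0).foldl (fun tiles ie =>
    let i := ie.1
    let entry := ie.2
    (PySem.List.pyRange entry.2.2.2 entry.2.2.1 1).foldl (fun tiles n =>
      if entry.1 > entry.2.1 then
        if ¬ (entry.2.1 ≤ n ∧ n < entry.1) then tiles ++ [(i, 0 - n, "\x1b[0;0;0m|")]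
        else tiles ++ [(i, 0 - n, "\x1b[0;0;41m ")]
      else if entry.1 < entry.2.1 then
        if ¬ (entry.1 ≤ n ∧ n < entry.2.1) then tiles ++ [(i, 0 - n, "\x1b[0;0;0m|")]
        else tiles ++ [(i, 0 - n, "\x1b[0;0;42m ")]
      else if entry.1 = entry.2.1 then tiles ++ [(i, 0 - n, "\x1b[0;0;0m|")]
      else tiles) tiles) []

-- ===== PORT B =====
def getTilesByPoints_alt (dataArray : List (Int × Int × Int × Int)) : List (Int × Int × String) :=
  (PySem.List.enumerate dataArray 0).foldl (fun tiles ie =>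
    let i := ie.1
    let o := ie.2.1
    let c := ie.2.2.1
    let hi := ie.2.2.2.1
    let lo := ie.2.2.2.2
    let bodyLow := min o c
    let bodyHigh := max o c
    let body : Option String :=
      if o > c then some "\x1b[0;0;41m " else if o < c then some "\x1b[0;0;42m " else none
    let t1 := (PySem.List.pyRange lo (min hi bodyLow) 1).foldl
      (fun acc n => acc ++ [(i, -n, "\x1b[0;0;0m|")]) tiles
    let t2 := match body with
      | some b => (PySem.List.pyRange (max lo bodyLow) (min hi bodyHigh) 1).foldl
          (fun acc n => acc ++ [(i, -n, b)]) t1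
      | none => t1
    (PySem.List.pyRange (max lo bodyHigh) hi 1).foldl
      (fun acc n => acc ++ [(i, -n, "\x1b[0;0;0m|")]) t2) []

-- ===== PRECONDITION & SPEC =====
def Spec_getTilesByPoints (dataArray : List (Int × Int × Int × Int)) (out : List (Int × Int × String)) : Prop := out = getTilesByPoints_alt dataArray
instance (dataArray : List (Int × Int × Int × Int)) (out : List (Int × Int × String)) : Decidable (Spec_getTilesByPoints dataArray out) := by unfold Spec_getTilesByPoints; infer_instance

-- ===== CLAIM (what is proved, stated in full; the proofs are below) =====
def Claim_equal_getTilesByPoints : Prop := ∀ (dataArray : List (Int × Int × Int × Int)), Dom_getTilesByPoints dataArray → Spec_getTilesByPoints dataArray (getTilesByPoints dataArray)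

-- ===== LEMMAS AND PROOFS =====

-- two Python ranges denote the same list when their bounds agree or both are empty
theorem pvRange_eq_sym (a b c d : Int)
    (h : (a = c ∧ b = d) ∨ (b ≤ a ∧ d ≤ c)) :
    PySem.List.pyRange a b 1 = PySem.List.pyRange c d 1 := by
  rcases h with ⟨h1, h2⟩ | ⟨h1, h2⟩
  · rw [h1, h2]
  · rw [PySem.List.pyRange_one_eq_nil h1, PySem.List.pyRange_one_eq_nil h2]

-- splitting a mapped range at a body interval [bL, bH) into wick/body/wick segments
theorem pvSplit3 {α : Type} (lo hi bL bH : Int) (hb : bL ≤ bH) (f g : Int → α) :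
    (PySem.List.pyRange lo hi 1).map (fun n => if bL ≤ n ∧ n < bH then g n else f n)
      = (PySem.List.pyRange lo (min hi bL) 1).map f
        ++ (PySem.List.pyRange (max lo bL) (min hi bH) 1).map g
        ++ (PySem.List.pyRange (max lo bH) hi 1).map f := by
  by_cases hlh : hi ≤ lo
  · rw [PySem.List.pyRange_one_eq_nil hlh,
      PySem.List.pyRange_one_eq_nil (by omega : min hi bL ≤ lo),
      PySem.List.pyRange_one_eq_nil (by omega : min hi bH ≤ max lo bL),
      PySem.List.pyRange_one_eq_nil (by omega : hi ≤ max lo bH)]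
    simp
  · have hlo : lo < hi := by omega
    have hp : lo ≤ max lo (min hi bL) := le_max_left _ _
    have hpq : max lo (min hi bL) ≤ max lo (min hi bH) := by omega
    have hq : max lo (min hi bH) ≤ hi := by omega
    have e1 : (PySem.List.pyRange lo (min hi bL) 1).map f
        = (PySem.List.pyRange lo (max lo (min hi bL)) 1).map (fun n => if bL ≤ n ∧ n < bH then g n else f n) := by
      rw [pvRange_eq_sym lo (min hi bL) lo (max lo (min hi bL)) (by omega)]
      refine (List.map_congr_left ?_).symm
      intro n hn
      rw [PySem.List.mem_pyRange_one] at hn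
      rw [if_neg (by omega)]
    have e2 : (PySem.List.pyRange (max lo bL) (min hi bH) 1).map g
        = (PySem.List.pyRange (max lo (min hi bL)) (max lo (min hi bH)) 1).map (fun n => if bL ≤ n ∧ n < bH then g n else f n) := by
      rw [pvRange_eq_sym (max lo bL) (min hi bH) (max lo (min hi bL)) (max lo (min hi bH)) (by omega)]
      refine (List.map_congr_left ?_).symm
      intro n hn
      rw [PySem.List.mem_pyRange_one] at hn
      rw [if_pos (by omega)]
    have e3 : (PySem.List.pyRange (max lo bH) hi 1).map f
        = (PySem.List.pyRange (max lo (min hi bH)) hi 1).map (fun n => if bL ≤ n ∧ n < bH then g n else f n) := by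
      rw [pvRange_eq_sym (max lo bH) hi (max lo (min hi bH)) hi (by omega)]
      refine (List.map_congr_left ?_).symm
      intro n hn
      rw [PySem.List.mem_pyRange_one] at hn
      rw [if_neg (by omega)]
    rw [e1, e2, e3, ← List.map_append, ← List.map_append, List.append_assoc,
      ← PySem.List.pyRange_one_append (max lo (min hi bL)) (max lo (min hi bH)) hi hpq hq,
      ← PySem.List.pyRange_one_append lo (max lo (min hi bL)) hi hp (le_trans hpq hq)]

-- per-entry: A's branching pixel loop equals B's three clamped segment loops
theorem pvStep_eq (acc : List (Int × Int × String)) (i o c hi lo : Int) :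
    (PySem.List.pyRange lo hi 1).foldl (fun tiles n =>
      if o > c then
        if ¬ (c ≤ n ∧ n < o) then tiles ++ [(i, 0 - n, "\x1b[0;0;0m|")]
        else tiles ++ [(i, 0 - n, "\x1b[0;0;41m ")]
      else if o < c then
        if ¬ (o ≤ n ∧ n < c) then tiles ++ [(i, 0 - n, "\x1b[0;0;0m|")]
        else tiles ++ [(i, 0 - n, "\x1b[0;0;42m ")]
      else if o = c then tiles ++ [(i, 0 - n, "\x1b[0;0;0m|")]
      else tiles) acc
    = (PySem.List.pyRange (max lo (max o c)) hi 1).foldl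
        (fun acc n => acc ++ [(i, -n, "\x1b[0;0;0m|")])
        ((match (if o > c then some "\x1b[0;0;41m " else if o < c then some "\x1b[0;0;42m " else none : Option String) with
          | some b => (PySem.List.pyRange (max lo (min o c)) (min hi (max o c)) 1).foldl
              (fun acc n => acc ++ [(i, -n, b)])
              ((PySem.List.pyRange lo (min hi (min o c)) 1).foldl
                (fun acc n => acc ++ [(i, -n, "\x1b[0;0;0m|")]) acc)
          | none => (PySem.List.pyRange lo (min hi (min o c)) 1).foldl
              (fun acc n => acc ++ [(i, -n, "\x1b[0;0;0m|")]) acc)) := by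
  rcases lt_trichotomy o c with hoc | hoc | hoc
  · -- o < c : green body over [o, c)
    have hng : ¬ o > c := by omega
    rw [if_neg hng, if_pos hoc]
    have hL : (PySem.List.pyRange lo hi 1).foldl (fun tiles n =>
        if o > c then
          if ¬ (c ≤ n ∧ n < o) then tiles ++ [(i, 0 - n, "\x1b[0;0;0m|")]
          else tiles ++ [(i, 0 - n, "\x1b[0;0;41m ")]
        else if o < c then
          if ¬ (o ≤ n ∧ n < c) then tiles ++ [(i, 0 - n, "\x1b[0;0;0m|")]
          else tiles ++ [(i, 0 - n, "\x1b[0;0;42m ")]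
        else if o = c then tiles ++ [(i, 0 - n, "\x1b[0;0;0m|")]
        else tiles) acc
      = (PySem.List.pyRange lo hi 1).foldl (fun tiles n =>
        tiles ++ [if o ≤ n ∧ n < c then ((i, -n, "\x1b[0;0;42m ") : Int × Int × String) else (i, -n, "\x1b[0;0;0m|")]) acc := by
      apply PySem.List.foldl_congr_mem
      intro a n _
      rw [if_neg hng, if_pos hoc]
      split_ifs <;> simp_all
    rw [hL, PySem.List.foldl_append_singleton_eq_map,
      pvSplit3 lo hi o c (le_of_lt hoc) (fun n => ((i, -n, "\x1b[0;0;0m|") : Int × Int × String)) (fun n => (i, -n, "\x1b[0;0;42m "))]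
    have h1 : min o c = o := by omega
    have h2 : max o c = c := by omega
    simp [h1, h2, List.append_assoc, ← List.flatMap_def, ← List.map_eq_flatMap]
  · -- o = c : all wick
    subst hoc
    have hng : ¬ o > o := by omega
    rw [if_neg hng, if_neg hng]
    have hL : (PySem.List.pyRange lo hi 1).foldl (fun tiles n =>
        if o > o then
          if ¬ (o ≤ n ∧ n < o) then tiles ++ [(i, 0 - n, "\x1b[0;0;0m|")]
          else tiles ++ [(i, 0 - n, "\x1b[0;0;41m ")]
        else if o < o then
          if ¬ (o ≤ n ∧ n < o) then tiles ++ [(i, 0 - n, "\x1b[0;0;0m|")]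
          else tiles ++ [(i, 0 - n, "\x1b[0;0;42m ")]
        else if o = o then tiles ++ [(i, 0 - n, "\x1b[0;0;0m|")]
        else tiles) acc
      = (PySem.List.pyRange lo hi 1).foldl (fun tiles n =>
        tiles ++ [((i, -n, "\x1b[0;0;0m|") : Int × Int × String)]) acc := by
      apply PySem.List.foldl_congr_mem
      intro a n _
      rw [if_neg hng, if_neg hng, if_pos rfl]
      simp
    rw [hL, PySem.List.foldl_append_singleton_eq_map]
    have hs := pvSplit3 lo hi o o le_rfl (fun n => ((i, -n, "\x1b[0;0;0m|") : Int × Int × String)) (fun n => (i, -n, "\x1b[0;0;0m|"))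
    simp only [ite_self] at hs
    rw [hs]
    have h1 : min o o = o := min_self o
    have h2 : max o o = o := max_self o
    simp [List.append_assoc, ← List.flatMap_def, ← List.map_eq_flatMap]
  · -- o > c : red body over [c, o)
    have hgt : o > c := hoc
    rw [if_pos hgt]
    have hL : (PySem.List.pyRange lo hi 1).foldl (fun tiles n =>
        if o > c then
          if ¬ (c ≤ n ∧ n < o) then tiles ++ [(i, 0 - n, "\x1b[0;0;0m|")]
          else tiles ++ [(i, 0 - n, "\x1b[0;0;41m ")]
        else if o < c then
          if ¬ (o ≤ n ∧ n < c) then tiles ++ [(i, 0 - n, "\x1b[0;0;0m|")]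
          else tiles ++ [(i, 0 - n, "\x1b[0;0;42m ")]
        else if o = c then tiles ++ [(i, 0 - n, "\x1b[0;0;0m|")]
        else tiles) acc
      = (PySem.List.pyRange lo hi 1).foldl (fun tiles n =>
        tiles ++ [if c ≤ n ∧ n < o then ((i, -n, "\x1b[0;0;41m ") : Int × Int × String) else (i, -n, "\x1b[0;0;0m|")]) acc := by
      apply PySem.List.foldl_congr_mem
      intro a n _
      rw [if_pos hgt]
      split_ifs <;> simp_all
    rw [hL, PySem.List.foldl_append_singleton_eq_map,
      pvSplit3 lo hi c o (le_of_lt hoc) (fun n => ((i, -n, "\x1b[0;0;0m|") : Int × Int × String)) (fun n => (i, -n, "\x1b[0;0;41m "))]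
    have h1 : min o c = c := by omega
    have h2 : max o c = o := by omega
    simp [h1, h2, List.append_assoc, ← List.flatMap_def, ← List.map_eq_flatMap]

-- ===== VERDICT (by name: the statement is the Claim_ definition above) =====
theorem getTilesByPoints_spec : Claim_equal_getTilesByPoints := by
  intro dataArray _
  show getTilesByPoints dataArray = getTilesByPoints_alt dataArray
  unfold getTilesByPoints getTilesByPoints_alt
  apply PySem.List.foldl_congr_mem
  intro acc ie _
  exact pvStep_eq acc ie.1 ie.2.1 ie.2.2.1 ie.2.2.2.1 ie.2.2.2.2
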